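-- pv_equiv track=rewrite | github.com/ganeshgowri-asa-et/lims-qms-platform | backend/services/template_parser.py | _detect_field_type
-- ===== SOURCE A (Python) =====
-- def _detect_field_type(label: str, cell) -> str:
--     """Detect field type from label and cell properties"""
--     label_lower = label.lower()
--
--     # Keyword-based detection
--     if any(kw in label_lower for kw in ['signature', 'sign']):
--         return 'SIGNATURE'
--     elif any(kw in label_lower for kw in ['date', 'time']):
--         if 'time' in label_lower:
--             return 'DATETIME'
--         return 'DATE'
--     elif any(kw in label_lower for kw in ['number', 'quantity', 'amount', 'count']):
--         return 'NUMBER'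
--     elif any(kw in label_lower for kw in ['file', 'attachment', 'upload']):
--         return 'FILE'
--     elif any(kw in label_lower for kw in ['dropdown', 'select', 'choose']):
--         return 'DROPDOWN'
--     elif any(kw in label_lower for kw in ['checkbox', 'check']):
--         return 'CHECKBOX'
--
--     # Default to text
--     return 'TEXT'
-- ===== SOURCE B (Python) =====
-- # Single left-to-right scan of the label: at each position try to match one of the
-- # keywords; keep the best (lowest) priority rank seen, decode the rank at the end.
-- # 'signature' is dropped ('sign' is a substring of it) and 'checkbox' likewise
-- # ('check'); 'time' (DATETIME) ranks before 'date' (DATE), preserving A's priority.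
-- _KW = {
--     'sign': 0, 'time': 1, 'date': 2,
--     'number': 3, 'quantity': 3, 'amount': 3, 'count': 3,
--     'file': 4, 'attachment': 4, 'upload': 4,
--     'dropdown': 5, 'select': 5, 'choose': 5,
--     'check': 6,
-- }
-- _TYPES = ['SIGNATURE', 'DATETIME', 'DATE', 'NUMBER', 'FILE', 'DROPDOWN', 'CHECKBOX']
--
--
-- def _detect_field_type(label: str, cell) -> str:
--     """Detect field type from label keywords by one positional scan over the label."""
--     s = label.lower()
--     best = 7
--     for i in range(len(s)):
--         for kw, rank in _KW.items():
--             if rank < best and s.startswith(kw, i):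
--                 best = rank
--     return _TYPES[best] if best < 7 else 'TEXT'
-- ===== Notes on version B (the rewrite author's own statement) =====
-- stated objective: alternative
-- what changed: Replaces the ordered first-match cascade of whole-string substring searches by a single positional scan of the label that matches keywords anchored at each index and keeps the minimum priority rank, decoded through a rank-to-type table at the end (redundant keywords 'signature'/'checkbox' dropped as superstrings of 'sign'/'check').
import Mathlib
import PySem

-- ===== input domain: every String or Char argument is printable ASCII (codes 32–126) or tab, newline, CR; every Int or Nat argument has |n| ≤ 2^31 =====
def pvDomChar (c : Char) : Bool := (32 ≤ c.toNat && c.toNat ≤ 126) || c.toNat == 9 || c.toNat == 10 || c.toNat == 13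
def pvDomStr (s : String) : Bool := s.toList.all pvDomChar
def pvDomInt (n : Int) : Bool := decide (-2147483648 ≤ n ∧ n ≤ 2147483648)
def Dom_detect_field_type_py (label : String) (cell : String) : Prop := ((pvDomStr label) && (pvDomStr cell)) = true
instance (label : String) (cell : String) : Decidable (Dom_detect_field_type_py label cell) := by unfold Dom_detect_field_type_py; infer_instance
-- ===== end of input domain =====

-- B replaces A's first-match keyword cascade by a single positional scan of the label
-- keeping the minimum priority rank, decoded through a rank→type table (alternative; same cost).
-- ===== PORT A =====
def detect_field_type_py (label : String) (cell : String) : String :=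
  let label_lower := PySem.Str.lower label
  if ["signature", "sign"].any (fun kw => PySem.Str.isIn kw label_lower) then
    "SIGNATURE"
  else if ["date", "time"].any (fun kw => PySem.Str.isIn kw label_lower) then
    (if PySem.Str.isIn "time" label_lower then "DATETIME" else "DATE")
  else if ["number", "quantity", "amount", "count"].any (fun kw => PySem.Str.isIn kw label_lower) then
    "NUMBER"
  else if ["file", "attachment", "upload"].any (fun kw => PySem.Str.isIn kw label_lower) then
    "FILE"
  else if ["dropdown", "select", "choose"].any (fun kw => PySem.Str.isIn kw label_lower) then
    "DROPDOWN"
  else if ["checkbox", "check"].any (fun kw => PySem.Str.isIn kw label_lower) then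
    "CHECKBOX"
  else
    "TEXT"

-- ===== PORT B =====
-- the _KW dict of Source B, in insertion order, and the _TYPES table
def pvKW : List (String × Nat) :=
  [("sign", 0), ("time", 1), ("date", 2),
   ("number", 3), ("quantity", 3), ("amount", 3), ("count", 3),
   ("file", 4), ("attachment", 4), ("upload", 4),
   ("dropdown", 5), ("select", 5), ("choose", 5),
   ("check", 6)]

def pvTypes : List String :=
  ["SIGNATURE", "DATETIME", "DATE", "NUMBER", "FILE", "DROPDOWN", "CHECKBOX"]

-- the two nested loops of Source B; s.startswith(kw, i) for 0 ≤ i < len(s) is exactly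
-- List.isPrefixOf on s.drop i
def pvBest (s : List Char) : Nat :=
  (List.range s.length).foldl
    (fun best i =>
      pvKW.foldl
        (fun b kv => if kv.2 < b && kv.1.toList.isPrefixOf (s.drop i) then kv.2 else b)
        best)
    7

def detect_field_type_py_alt (label : String) (cell : String) : String :=
  let s := (PySem.Str.lower label).toList
  let best := pvBest s
  -- _TYPES[best] with best < 7 established by the guard (never out of range)
  if best < 7 then pvTypes.getD best "TEXT" else "TEXT"

-- ===== PRECONDITION & SPEC =====
def Spec_detect_field_type_py (label : String) (cell : String) (out : String) : Prop := out = detect_field_type_py_alt label cell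
instance (label : String) (cell : String) (out : String) : Decidable (Spec_detect_field_type_py label cell out) := by unfold Spec_detect_field_type_py; infer_instance

-- ===== CLAIM (what is proved, stated in full; the proofs are below) =====
def Claim_equal_detect_field_type_py : Prop := ∀ (label : String) (cell : String), Dom_detect_field_type_py label cell → Spec_detect_field_type_py label cell (detect_field_type_py label cell)

-- ===== LEMMAS AND PROOFS =====

-- the inner loop (minimum over the keyword table at one position) never increases the accumulator
theorem pv_fmin_le (K : List (String × Nat)) (p : String × Nat → Bool) :
    ∀ b : Nat, K.foldl (fun b kv => if kv.2 < b && p kv then kv.2 else b) b ≤ b := by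
  induction K with
  | nil => intro b; simp
  | cons kv t ih =>
    intro b
    simp only [List.foldl_cons]
    refine le_trans (ih _) ?_
    split
    · rename_i h; exact le_of_lt (of_decide_eq_true (Bool.and_eq_true _ _ ▸ h).1)
    · exact le_rfl

theorem pv_fmin_le_rank (K : List (String × Nat)) (p : String × Nat → Bool) :
    ∀ b : Nat, ∀ kv ∈ K, p kv = true →
      K.foldl (fun b kv => if kv.2 < b && p kv then kv.2 else b) b ≤ kv.2 := by
  induction K with
  | nil => intro b kv h; simp at h
  | cons kw t ih =>
    intro b kv hmem hp
    rcases List.mem_cons.mp hmem with rfl | hmem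
    · simp only [List.foldl_cons, hp, Bool.and_true]
      by_cases h : kv.2 < b
      · simp only [h, decide_true, if_true]; exact pv_fmin_le t p _
      · simp only [h, decide_false]
        exact le_trans (pv_fmin_le t p b) (Nat.le_of_not_lt h)
    · exact ih _ kv hmem hp

theorem pv_fmin_cases (K : List (String × Nat)) (p : String × Nat → Bool) :
    ∀ b : Nat, K.foldl (fun b kv => if kv.2 < b && p kv then kv.2 else b) b = b ∨
      ∃ kv ∈ K, p kv = true ∧
        K.foldl (fun b kv => if kv.2 < b && p kv then kv.2 else b) b = kv.2 := by
  induction K with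
  | nil => intro b; left; simp
  | cons kw t ih =>
    intro b
    simp only [List.foldl_cons]
    by_cases h : (kw.2 < b && p kw) = true
    · rcases ih (if kw.2 < b && p kw then kw.2 else b) with h1 | ⟨kv, hm, hp, he⟩
      · right
        exact ⟨kw, List.mem_cons_self .., (Bool.and_eq_true _ _ ▸ h).2, by simpa [h] using h1⟩
      · right; exact ⟨kv, List.mem_cons_of_mem _ hm, hp, he⟩
    · rcases ih (if kw.2 < b && p kw then kw.2 else b) with h1 | ⟨kv, hm, hp, he⟩
      · left; simpa [h] using h1
      · right; exact ⟨kv, List.mem_cons_of_mem _ hm, hp, he⟩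

-- outer-loop versions, over the list of scanned positions
theorem pv_best_le (s : List Char) (il : List Nat) :
    ∀ b : Nat,
      il.foldl (fun best i => pvKW.foldl
        (fun b kv => if kv.2 < b && kv.1.toList.isPrefixOf (s.drop i) then kv.2 else b) best) b ≤ b := by
  induction il with
  | nil => intro b; simp
  | cons i t ih =>
    intro b
    simp only [List.foldl_cons]
    exact le_trans (ih _) (pv_fmin_le pvKW (fun kv => kv.1.toList.isPrefixOf (s.drop i)) b)

theorem pv_best_le_rank (s : List Char) (il : List Nat) :
    ∀ b : Nat, ∀ i ∈ il, ∀ kv ∈ pvKW, kv.1.toList.isPrefixOf (s.drop i) = true →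
      il.foldl (fun best i => pvKW.foldl
        (fun b kv => if kv.2 < b && kv.1.toList.isPrefixOf (s.drop i) then kv.2 else b) best) b ≤ kv.2 := by
  induction il with
  | nil => intro b i h; simp at h
  | cons j t ih =>
    intro b i hi kv hkv hp
    simp only [List.foldl_cons]
    rcases List.mem_cons.mp hi with rfl | hi
    · exact le_trans (pv_best_le s t _)
        (pv_fmin_le_rank pvKW (fun kv => kv.1.toList.isPrefixOf (s.drop i)) b kv hkv hp)
    · exact ih _ i hi kv hkv hp

theorem pv_best_cases (s : List Char) (il : List Nat) :
    ∀ b : Nat,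
      il.foldl (fun best i => pvKW.foldl
        (fun b kv => if kv.2 < b && kv.1.toList.isPrefixOf (s.drop i) then kv.2 else b) best) b = b ∨
      ∃ i ∈ il, ∃ kv ∈ pvKW, kv.1.toList.isPrefixOf (s.drop i) = true ∧
        il.foldl (fun best i => pvKW.foldl
          (fun b kv => if kv.2 < b && kv.1.toList.isPrefixOf (s.drop i) then kv.2 else b) best) b = kv.2 := by
  induction il with
  | nil => intro b; left; simp
  | cons j t ih =>
    intro b
    simp only [List.foldl_cons]
    rcases ih (pvKW.foldl (fun b kv => if kv.2 < b && kv.1.toList.isPrefixOf (s.drop j) then kv.2 else b) b)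
      with h1 | ⟨i, hi, kv, hkv, hp, he⟩
    · rcases pv_fmin_cases pvKW (fun kv => kv.1.toList.isPrefixOf (s.drop j)) b with h2 | ⟨kv, hkv, hp, he⟩
      · left; rw [h1, h2]
      · right; exact ⟨j, List.mem_cons_self .., kv, hkv, hp, by rw [h1, he]⟩
    · right; exact ⟨i, List.mem_cons_of_mem _ hi, kv, hkv, hp, he⟩

-- a nonempty keyword occurs as a prefix at some scanned position iff it is a substring
theorem pv_matched_iff (kw : List Char) (hk : kw ≠ []) (s : List Char) :
    (∃ i ∈ List.range s.length, kw.isPrefixOf (s.drop i) = true) ↔ PySem.Chars.isIn kw s = true := by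
  rw [← PySem.Chars.exists_prefix_drop_iff_isIn]
  constructor
  · rintro ⟨i, _, hp⟩; exact ⟨i, List.isPrefixOf_iff_prefix.mp hp⟩
  · rintro ⟨j, hp⟩
    by_cases hj : j < s.length
    · exact ⟨j, List.mem_range.mpr hj, List.isPrefixOf_iff_prefix.mpr hp⟩
    · exfalso
      have : s.drop j = [] := List.drop_eq_nil_of_le (Nat.le_of_not_lt hj)
      rw [this] at hp
      exact hk (List.prefix_nil.mp hp)

-- pvBest computes the minimum rank of a keyword occurring in s (7 if none does)
theorem pv_best_eq (s : List Char) (r : Nat) (hr : r < 7)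
    (h1 : ∃ kv ∈ pvKW, kv.2 = r ∧ PySem.Chars.isIn kv.1.toList s = true)
    (h2 : ∀ kv ∈ pvKW, PySem.Chars.isIn kv.1.toList s = true → r ≤ kv.2) :
    pvBest s = r := by
  obtain ⟨kv, hkv, hrank, hin⟩ := h1
  have hne : kv.1.toList ≠ [] := by
    fin_cases hkv <;> simp
  obtain ⟨i, hi, hp⟩ := (pv_matched_iff kv.1.toList hne s).mpr hin
  apply le_antisymm
  · calc pvBest s ≤ kv.2 := pv_best_le_rank s (List.range s.length) 7 i hi kv hkv hp
    _ = r := hrank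
  · rcases pv_best_cases s (List.range s.length) 7 with h | ⟨i', _, kv', hkv', hp', he⟩
    · unfold pvBest; rw [h]; omega
    · have hne' : kv'.1.toList ≠ [] := by fin_cases hkv' <;> simp
      have hin' : PySem.Chars.isIn kv'.1.toList s = true :=
        (pv_matched_iff kv'.1.toList hne' s).mp ⟨i', by assumption, hp'⟩
      unfold pvBest; rw [he]
      exact h2 kv' hkv' hin'

theorem pv_best_none (s : List Char)
    (h : ∀ kv ∈ pvKW, PySem.Chars.isIn kv.1.toList s = false) :
    pvBest s = 7 := by
  rcases pv_best_cases s (List.range s.length) 7 with h1 | ⟨i, hi, kv, hkv, hp, he⟩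
  · exact h1
  · have hne : kv.1.toList ≠ [] := by fin_cases hkv <;> simp
    have := (pv_matched_iff kv.1.toList hne s).mp ⟨i, hi, hp⟩
    rw [h kv hkv] at this
    exact absurd this (by simp)

-- a superstring occurrence implies the occurrence of its substring
theorem pv_isIn_mono (a b s : List Char) (hab : a <:+: b)
    (h : PySem.Chars.isIn b s = true) : PySem.Chars.isIn a s = true :=
  (PySem.Chars.isIn_iff_infix a s).mpr (hab.trans ((PySem.Chars.isIn_iff_infix b s).mp h))

-- ===== VERDICT (by name: the statement is the Claim_ definition above) =====
theorem detect_field_type_py_spec : Claim_equal_detect_field_type_py := by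
  intro label cell _
  unfold Spec_detect_field_type_py detect_field_type_py detect_field_type_py_alt
  simp only [List.any_cons, List.any_nil, Bool.or_false, Bool.or_eq_true,
    PySem.Str.isIn_eq, PySem.Str.toList_lower]
  set s : List Char := PySem.Chars.lower label.toList with hs
  by_cases hsign : PySem.Chars.isIn ['s', 'i', 'g', 'n'] s = true
  · rw [pv_best_eq s 0 (by omega) ⟨("sign", 0), by decide, rfl, hsign⟩ (fun kv _ _ => Nat.zero_le _)]
    simp [pvTypes, hsign]
  · have hsig : PySem.Chars.isIn ['s', 'i', 'g', 'n', 'a', 't', 'u', 'r', 'e'] s = false := by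
      rcases h : PySem.Chars.isIn ['s', 'i', 'g', 'n', 'a', 't', 'u', 'r', 'e'] s with _ | _
      · rfl
      · exact absurd (pv_isIn_mono ['s', 'i', 'g', 'n'] _ s (by decide) h) hsign
    by_cases htime : PySem.Chars.isIn ['t', 'i', 'm', 'e'] s = true
    · rw [pv_best_eq s 1 (by omega) ⟨("time", 1), by decide, rfl, htime⟩ ?_]
      · simp [pvTypes, hsig, hsign, htime]
      · intro kv hkv hin
        fin_cases hkv <;> simp_all
    · by_cases hdate : PySem.Chars.isIn ['d', 'a', 't', 'e'] s = true
      · rw [pv_best_eq s 2 (by omega) ⟨("date", 2), by decide, rfl, hdate⟩ ?_]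
        · simp [pvTypes, hsig, hsign, htime, hdate]
        · intro kv hkv hin
          fin_cases hkv <;> simp_all
      · by_cases hnum : (PySem.Chars.isIn ['n', 'u', 'm', 'b', 'e', 'r'] s = true ∨
            PySem.Chars.isIn ['q', 'u', 'a', 'n', 't', 'i', 't', 'y'] s = true ∨
            PySem.Chars.isIn ['a', 'm', 'o', 'u', 'n', 't'] s = true ∨
            PySem.Chars.isIn ['c', 'o', 'u', 'n', 't'] s = true)
        · have h1 : ∃ kv ∈ pvKW, kv.2 = 3 ∧ PySem.Chars.isIn kv.1.toList s = true := by
            rcases hnum with h | h | h | h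
            exacts [⟨("number", 3), by decide, rfl, h⟩, ⟨("quantity", 3), by decide, rfl, h⟩,
              ⟨("amount", 3), by decide, rfl, h⟩, ⟨("count", 3), by decide, rfl, h⟩]
          rw [pv_best_eq s 3 (by omega) h1 ?_]
          · simp [pvTypes, hsig, hsign, htime, hdate, hnum]
          · intro kv hkv hin
            fin_cases hkv <;> simp_all
        · by_cases hfile : (PySem.Chars.isIn ['f', 'i', 'l', 'e'] s = true ∨
              PySem.Chars.isIn ['a', 't', 't', 'a', 'c', 'h', 'm', 'e', 'n', 't'] s = true ∨
              PySem.Chars.isIn ['u', 'p', 'l', 'o', 'a', 'd'] s = true)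
          · have h1 : ∃ kv ∈ pvKW, kv.2 = 4 ∧ PySem.Chars.isIn kv.1.toList s = true := by
              rcases hfile with h | h | h
              exacts [⟨("file", 4), by decide, rfl, h⟩, ⟨("attachment", 4), by decide, rfl, h⟩,
                ⟨("upload", 4), by decide, rfl, h⟩]
            rw [pv_best_eq s 4 (by omega) h1 ?_]
            · push Not at hnum
              simp [pvTypes, hsig, hsign, htime, hdate, hnum, hfile]
            · intro kv hkv hin
              push Not at hnum
              fin_cases hkv <;> simp_all
          · by_cases hdd : (PySem.Chars.isIn ['d', 'r', 'o', 'p', 'd', 'o', 'w', 'n'] s = true ∨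
                PySem.Chars.isIn ['s', 'e', 'l', 'e', 'c', 't'] s = true ∨
                PySem.Chars.isIn ['c', 'h', 'o', 'o', 's', 'e'] s = true)
            · have h1 : ∃ kv ∈ pvKW, kv.2 = 5 ∧ PySem.Chars.isIn kv.1.toList s = true := by
                rcases hdd with h | h | h
                exacts [⟨("dropdown", 5), by decide, rfl, h⟩, ⟨("select", 5), by decide, rfl, h⟩,
                  ⟨("choose", 5), by decide, rfl, h⟩]
              rw [pv_best_eq s 5 (by omega) h1 ?_]
              · push Not at hnum hfile
                simp [pvTypes, hsig, hsign, htime, hdate, hnum, hfile, hdd]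
              · intro kv hkv hin
                push Not at hnum hfile
                fin_cases hkv <;> simp_all
            · by_cases hchk : PySem.Chars.isIn ['c', 'h', 'e', 'c', 'k'] s = true
              · rw [pv_best_eq s 6 (by omega) ⟨("check", 6), by decide, rfl, hchk⟩ ?_]
                · push Not at hnum hfile hdd
                  simp [pvTypes, hsig, hsign, htime, hdate, hnum, hfile, hdd, hchk]
                · intro kv hkv hin
                  push Not at hnum hfile hdd
                  fin_cases hkv <;> simp_all
              · have hcbx : PySem.Chars.isIn ['c', 'h', 'e', 'c', 'k', 'b', 'o', 'x'] s = false := by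
                  rcases h : PySem.Chars.isIn ['c', 'h', 'e', 'c', 'k', 'b', 'o', 'x'] s with _ | _
                  · rfl
                  · exact absurd (pv_isIn_mono ['c', 'h', 'e', 'c', 'k'] _ s (by decide) h) hchk
                rw [pv_best_none s ?_]
                · push Not at hnum hfile hdd
                  simp [hsig, hsign, htime, hdate, hnum, hfile, hdd, hchk, hcbx]
                · intro kv hkv
                  push Not at hnum hfile hdd
                  fin_cases hkv <;> simp_all
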